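-- pv_equiv track=rewrite | github.com/aceleradores/Procesamiento_Imagenes | Analisis_imagen.py | encontrar_limite
-- ===== SOURCE A (Python) =====
-- def encontrar_limite(imagen, lineas):
--     valores_y = []
--     cambio_fase = []
--
--     for linea in lineas:
--         if not all(len(row) > linea for row in imagen):
--             continue  # Salta la línea si alguna fila no tiene suficientes elementos
--
--         valor_anterior = None
--         for y, row in enumerate(imagen):
--             pixel = row[linea]
--             valor_y = pixel
--             valores_y.append(valor_y)
--
--             if valor_anterior is not None and valor_y != valor_anterior:
--                 cambio_fase.append((linea, valor_y, y))  # Guarda valor Y y su índice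
--
--             valor_anterior = valor_y
--
--     return valores_y, cambio_fase
-- ===== SOURCE B (Python) =====
-- def encontrar_limite(imagen, lineas):
--     # Row-major single pass: dedup the requested lines, keep a bucket per valid
--     # line, sweep the image once row by row comparing against the previous row,
--     # then assemble the output in the order of `lineas` by bucket lookup.
--     ok = [l for l in dict.fromkeys(lineas)
--           if all(len(row) > l for row in imagen)]
--     buckets = [[l, [], []] for l in ok]
--     prev = None
--     for y, row in enumerate(imagen):
--         for b in buckets:
--             v = row[b[0]]
--             b[1].append(v)
--             if prev is not None and v != prev[b[0]]:
--                 b[2].append((b[0], v, y))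
--         prev = row
--     valores_y = []
--     cambio_fase = []
--     for l in lineas:
--         b = next((b for b in buckets if b[0] == l), None)
--         if b is not None:
--             valores_y += b[1]
--             cambio_fase += b[2]
--     return valores_y, cambio_fase
-- ===== Notes on version B (the rewrite author's own statement) =====
-- stated objective: alternative
-- what changed: Inverts the loop nesting: instead of A's per-line column scan over the image, B dedups the requested lines, sweeps the image once row by row comparing each row to the previous one while filling a bucket (values, changes) per valid line, and finally assembles the output in the order of lineas by bucket lookup; duplicate lines are computed once.
import Mathlib
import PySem

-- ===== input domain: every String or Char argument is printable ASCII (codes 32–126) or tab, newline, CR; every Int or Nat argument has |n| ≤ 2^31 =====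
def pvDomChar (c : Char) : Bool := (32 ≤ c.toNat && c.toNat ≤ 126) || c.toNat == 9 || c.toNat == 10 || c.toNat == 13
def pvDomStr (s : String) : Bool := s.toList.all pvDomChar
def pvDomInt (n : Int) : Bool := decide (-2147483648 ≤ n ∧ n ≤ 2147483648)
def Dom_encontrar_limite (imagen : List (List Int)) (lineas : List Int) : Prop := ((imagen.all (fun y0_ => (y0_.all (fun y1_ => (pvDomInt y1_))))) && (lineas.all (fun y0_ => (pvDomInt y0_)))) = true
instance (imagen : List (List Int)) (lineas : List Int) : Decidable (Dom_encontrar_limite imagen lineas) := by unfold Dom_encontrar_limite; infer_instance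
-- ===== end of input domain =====

-- B inverts A's loop nesting: one row-by-row pass filling a bucket per valid (deduplicated)
-- line, then assembly in the order of lineas; objective: alternative decomposition.

-- ===== PORT A =====
-- literal port of A: outer loop over lineas, all(len(row) > linea) guard, inner
-- enumerate loop carrying valor_anterior (Option Int) and appending one by one.
def encontrar_limite (imagen : List (List Int)) (lineas : List Int) :
    List Int × (List (Int × Int × Int)) :=
  lineas.foldl
    (fun st linea =>
      if imagen.all (fun row => linea < (row.length : Int)) then
        let fin :=
          (PySem.List.enumerate imagen).foldl
            (fun (s : Option Int × List Int × List (Int × Int × Int)) (p : Int × List Int) =>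
              let pixel := PySem.List.pyGetD p.2 linea 0   -- row[linea]; Pre_ keeps it in range
              let valores := s.2.1 ++ [pixel]
              let cambios :=
                match s.1 with
                | some v => if pixel ≠ v then s.2.2 ++ [(linea, pixel, p.1)] else s.2.2
                | none => s.2.2
              (some pixel, valores, cambios))
            (none, st.1, st.2)
        (fin.2.1, fin.2.2)
      else st)
    ([], [])

-- ===== PORT B =====
-- literal port of Source B: dedup lineas, one bucket per valid line, a single row-major pass
-- over enumerate(imagen) carrying prev : Option row, then assembly by bucket lookup.
def encontrar_limite_alt (imagen : List (List Int)) (lineas : List Int) :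
    List Int × (List (Int × Int × Int)) :=
  let ok := (PySem.List.dedup lineas).filter
      (fun l => imagen.all (fun row => l < (row.length : Int)))
  let buckets0 : List (Int × List Int × List (Int × Int × Int)) :=
      ok.map (fun l => (l, [], []))
  let fin :=
    (PySem.List.enumerate imagen).foldl
      (fun (s : Option (List Int) × List (Int × List Int × List (Int × Int × Int)))
           (p : Int × List Int) =>
        (some p.2,
         s.2.map (fun b =>
           let v := PySem.List.pyGetD p.2 b.1 0   -- row[b[0]]; Pre_ keeps it in range
           (b.1, b.2.1 ++ [v],
            match s.1 with
            | some prev =>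
                if v ≠ PySem.List.pyGetD prev b.1 0 then b.2.2 ++ [(b.1, v, p.1)] else b.2.2
            | none => b.2.2))))
      (none, buckets0)
  lineas.foldl
    (fun st l =>
      match fin.2.find? (fun b => b.1 == l) with
      | some b => (st.1 ++ b.2.1, st.2 ++ b.2.2)
      | none => st)
    ([], [])

-- ===== PRECONDITION & SPEC =====
-- Pre_ excludes exactly the inputs where the Python A raises IndexError: a negative
-- linea (the all(len(row) > linea) guard always passes then) with some row shorter
-- than |linea|; Python B raises there too.
def Pre_encontrar_limite (imagen : List (List Int)) (lineas : List Int) : Prop :=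
  ∀ l ∈ lineas, l < 0 → ∀ row ∈ imagen, -l ≤ (row.length : Int)
instance (imagen : List (List Int)) (lineas : List Int) : Decidable (Pre_encontrar_limite imagen lineas) := by unfold Pre_encontrar_limite; infer_instance
def pvWitness_encontrar_limite : List (List Int) × List Int := ([[1, 2], [3, 4]], [0, 1, -1])

def Spec_encontrar_limite (imagen : List (List Int)) (lineas : List Int) (out : List Int × (List (Int × Int × Int))) : Prop := out = encontrar_limite_alt imagen lineas
instance (imagen : List (List Int)) (lineas : List Int) (out : List Int × (List (Int × Int × Int))) : Decidable (Spec_encontrar_limite imagen lineas out) := by unfold Spec_encontrar_limite; infer_instance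

-- ===== CLAIM (what is proved, stated in full; the proofs are below) =====
def Claim_equal_encontrar_limite : Prop := ∀ (imagen : List (List Int)) (lineas : List Int), Dom_encontrar_limite imagen lineas → Pre_encontrar_limite imagen lineas → Spec_encontrar_limite imagen lineas (encontrar_limite imagen lineas)

-- ===== LEMMAS AND PROOFS =====

-- the change list both sides build for one line: a triple per position whose value
-- differs from the previous one
def pvChg (linea : Int) (prev : Int) : List Int → Int → List (Int × Int × Int)
  | [], _ => []
  | x :: xs, k => (if x ≠ prev then [(linea, x, k)] else []) ++ pvChg linea x xs (k + 1)

-- the column of line l and its change list (empty image → both empty)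
def pvCol (imagen : List (List Int)) (l : Int) : List Int :=
  imagen.map (fun row => PySem.List.pyGetD row l 0)

def pvChgF (imagen : List (List Int)) (l : Int) : List (Int × Int × Int) :=
  match pvCol imagen l with
  | [] => []
  | c0 :: cs => pvChg l c0 cs 1

-- A's inner fold computes column + pvChg
theorem pv_innerA (linea : Int) (xs : List (List Int)) :
    ∀ (k : Int) (p : Int) (V : List Int) (C : List (Int × Int × Int)),
    (PySem.List.enumerate xs k).foldl
      (fun (s : Option Int × List Int × List (Int × Int × Int)) (q : Int × List Int) =>
        (some (PySem.List.pyGetD q.2 linea 0),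
         s.2.1 ++ [PySem.List.pyGetD q.2 linea 0],
         match s.1 with
         | some v =>
             if PySem.List.pyGetD q.2 linea 0 ≠ v then
               s.2.2 ++ [(linea, PySem.List.pyGetD q.2 linea 0, q.1)]
             else s.2.2
         | none => s.2.2))
      (some p, V, C)
    = (some ((xs.map (fun row => PySem.List.pyGetD row linea 0)).getLastD p),
       V ++ xs.map (fun row => PySem.List.pyGetD row linea 0),
       C ++ pvChg linea p (xs.map (fun row => PySem.List.pyGetD row linea 0)) k) := by
  induction xs with
  | nil => intro k p V C; simp [PySem.List.enumerate, pvChg]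
  | cons r rs ih =>
      intro k p V C
      rw [PySem.List.enumerate_cons]
      simp only [List.foldl_cons, List.map_cons, List.getLastD_cons]
      rw [ih (k + 1) (PySem.List.pyGetD r linea 0) (V ++ [PySem.List.pyGetD r linea 0])]
      by_cases h : PySem.List.pyGetD r linea 0 = p <;>
        simp [pvChg, h, List.append_assoc]

-- A's whole guarded branch, in terms of pvCol/pvChgF
theorem pv_bodyA (imagen : List (List Int)) (linea : Int)
    (st : List Int × List (Int × Int × Int)) :
    (let fin :=
       (PySem.List.enumerate imagen).foldl
         (fun (s : Option Int × List Int × List (Int × Int × Int)) (p : Int × List Int) =>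
           let pixel := PySem.List.pyGetD p.2 linea 0
           let valores := s.2.1 ++ [pixel]
           let cambios :=
             match s.1 with
             | some v => if pixel ≠ v then s.2.2 ++ [(linea, pixel, p.1)] else s.2.2
             | none => s.2.2
           (some pixel, valores, cambios))
         (none, st.1, st.2)
     ((fin.2.1, fin.2.2) : List Int × List (Int × Int × Int)))
    = (st.1 ++ pvCol imagen linea, st.2 ++ pvChgF imagen linea) := by
  cases imagen with
  | nil => simp [PySem.List.enumerate, pvCol, pvChgF]
  | cons r rs =>
      rw [PySem.List.enumerate_cons]
      simp only [List.foldl_cons]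
      rw [pv_innerA linea rs (0 + 1) (PySem.List.pyGetD r linea 0)
        (st.1 ++ [PySem.List.pyGetD r linea 0]) st.2]
      simp [pvCol, pvChgF, List.append_assoc]

-- B's per-bucket run over the remaining rows (what the row-major fold does to one bucket)
def pvRun (p : Option (List Int)) (xs : List (List Int)) (k : Int)
    (b : Int × List Int × List (Int × Int × Int)) :
    Int × List Int × List (Int × Int × Int) :=
  match xs with
  | [] => b
  | r :: rs =>
      pvRun (some r) rs (k + 1)
        (b.1, b.2.1 ++ [PySem.List.pyGetD r b.1 0],
         match p with
         | some prev =>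
             if PySem.List.pyGetD r b.1 0 ≠ PySem.List.pyGetD prev b.1 0 then
               b.2.2 ++ [(b.1, PySem.List.pyGetD r b.1 0, k)]
             else b.2.2
         | none => b.2.2)

-- the row-major fold acts on each bucket independently, as pvRun
theorem pv_fold_map (xs : List (List Int)) :
    ∀ (k : Int) (p : Option (List Int))
      (bs : List (Int × List Int × List (Int × Int × Int))),
    ((PySem.List.enumerate xs k).foldl
      (fun (s : Option (List Int) × List (Int × List Int × List (Int × Int × Int)))
           (q : Int × List Int) =>
        (some q.2,
         s.2.map (fun b =>
           let v := PySem.List.pyGetD q.2 b.1 0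
           (b.1, b.2.1 ++ [v],
            match s.1 with
            | some prev =>
                if v ≠ PySem.List.pyGetD prev b.1 0 then b.2.2 ++ [(b.1, v, q.1)] else b.2.2
            | none => b.2.2))))
      (p, bs)).2
    = bs.map (pvRun p xs k) := by
  induction xs with
  | nil =>
      intro k p bs
      simp [PySem.List.enumerate]
      exact (List.map_congr_left (fun b _ => (rfl : pvRun p [] k b = id b))).trans (List.map_id bs) |>.symm
  | cons r rs ih =>
      intro k p bs
      rw [PySem.List.enumerate_cons]
      simp only [List.foldl_cons]
      rw [ih (k + 1) (some r)]
      rw [List.map_map]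
      rfl

-- pvRun started with a known previous row appends the column tail and its pvChg
theorem pv_run_some (l : Int) (xs : List (List Int)) :
    ∀ (k : Int) (p : List Int) (V : List Int) (C : List (Int × Int × Int)),
    pvRun (some p) xs k (l, V, C)
    = (l, V ++ xs.map (fun row => PySem.List.pyGetD row l 0),
       C ++ pvChg l (PySem.List.pyGetD p l 0) (xs.map (fun row => PySem.List.pyGetD row l 0)) k) := by
  induction xs with
  | nil => intro k p V C; simp [pvRun, pvChg]
  | cons r rs ih =>
      intro k p V C
      rw [pvRun]
      simp only
      rw [ih (k + 1) r]
      by_cases h : PySem.List.pyGetD r l 0 = PySem.List.pyGetD p l 0 <;>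
        simp [pvChg, h, List.append_assoc]

-- pvRun from the empty bucket computes the column and pvChgF
theorem pv_run_none (imagen : List (List Int)) (l : Int) :
    pvRun none imagen 0 (l, [], []) = (l, pvCol imagen l, pvChgF imagen l) := by
  cases imagen with
  | nil => simp [pvRun, pvCol, pvChgF]
  | cons r rs =>
      rw [pvRun]
      simp only
      rw [pv_run_some l rs (0 + 1) r]
      simp [pvCol, pvChgF]

-- lookup in the finished bucket list
theorem pv_find (imagen : List (List Int)) (l : Int) :
    ∀ (ok : List Int),
    ((ok.map (fun l' => (l', pvCol imagen l', pvChgF imagen l'))).find?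
        (fun b => b.1 == l))
    = if l ∈ ok then some (l, pvCol imagen l, pvChgF imagen l) else none := by
  intro ok
  induction ok with
  | nil => simp
  | cons a as ih =>
      by_cases h : a = l
      · subst h; simp
      · have hne : (a == l) = false := by simp [h]
        simp only [List.map_cons, List.find?, hne, ih, List.mem_cons]
        by_cases hm : l ∈ as
        · simp [hm]
        · simp [hm]; exact fun hh => absurd hh.symm h

theorem pv_foldl_congr {α β : Type} (f g : β → α → β) (l : List α)
    (h : ∀ st a, a ∈ l → f st a = g st a) :
    ∀ (st : β), l.foldl f st = l.foldl g st := by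
  induction l with
  | nil => intro st; rfl
  | cons a l ih =>
      intro st
      simp only [List.foldl_cons]
      rw [h st a (by simp)]
      exact ih (fun st a ha => h st a (by simp [ha])) _

theorem pv_main (imagen : List (List Int)) (lineas : List Int) :
    encontrar_limite imagen lineas = encontrar_limite_alt imagen lineas := by
  unfold encontrar_limite encontrar_limite_alt
  simp only []
  rw [pv_fold_map imagen 0 none]
  rw [List.map_map]
  have hrun : ∀ l : Int,
      (pvRun none imagen 0 ∘ fun l => (l, ([] : List Int), ([] : List (Int × Int × Int)))) l
        = (fun l' => (l', pvCol imagen l', pvChgF imagen l')) l := by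
    intro l; simp [Function.comp, pv_run_none]
  rw [List.map_congr_left (fun l _ => hrun l)]
  apply pv_foldl_congr
  intro st l hl
  by_cases hg : imagen.all (fun row => decide (l < (row.length : Int))) = true
  · rw [if_pos hg]
    have hmem : l ∈ (PySem.List.dedup lineas).filter
        (fun l => imagen.all (fun row => decide (l < (row.length : Int)))) := by
      rw [List.mem_filter]
      exact ⟨(PySem.List.mem_dedup lineas l).2 hl, hg⟩
    rw [pv_find imagen l, if_pos hmem]
    exact pv_bodyA imagen l st
  · rw [if_neg hg]
    have hnmem : l ∉ (PySem.List.dedup lineas).filter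
        (fun l => imagen.all (fun row => decide (l < (row.length : Int)))) := by
      rw [List.mem_filter]
      rintro ⟨-, h⟩; exact hg h
    rw [pv_find imagen l, if_neg hnmem]

-- ===== VERDICT (by name: the statement is the Claim_ definition above) =====
theorem encontrar_limite_spec : Claim_equal_encontrar_limite := by
  intro imagen lineas _ _
  unfold Spec_encontrar_limite
  exact pv_main imagen lineas
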